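-- pv_equiv track=rewrite | github.com/SirRDragonbornKnight/Forge_AI | enigma_engine/avatar/lip_sync.py | animate_speaking
-- ===== SOURCE A (Python) =====
-- def animate_speaking(text: str) -> list[str]:
--     """
--     Generate frame-by-frame mouth shapes for speaking animation.
--
--     Args:
--         text: Text being spoken
--
--     Returns:
--         List of sprite names for animation frames
--     """
--     # Simple alternating pattern for speaking
--     # In a real implementation, this would use the viseme sequence
--
--     # Estimate number of frames based on text length
--     word_count = len(text.split())
--     frame_count = max(2, word_count * 2)
--
--     # Alternate between speaking frames
--     frames = []
--     for i in range(frame_count):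
--         if i % 2 == 0:
--             frames.append("speaking_1")
--         else:
--             frames.append("speaking_2")
--
--     # End with neutral
--     frames.append("idle")
--
--     return frames
-- ===== SOURCE B (Python) =====
-- def animate_speaking(text: str) -> list[str]:
--     """Data-driven recursion over the word list: emit one two-frame pair per word
--     (at least one pair even with no words), terminated by 'idle'."""
--     def emit(words):
--         rest = ["idle"] if len(words) <= 1 else emit(words[1:])
--         return ["speaking_1", "speaking_2"] + rest
--     return emit(text.split())
-- ===== Notes on version B (the rewrite author's own statement) =====
-- stated objective: alternative
-- what changed: Replaces A's count-driven index loop (frame_count = max(2, 2*words) with a modulo branch per index) by a data-driven recursion over the word list that emits one two-frame pair per word (at least one pair), terminated by the final idle frame; no frame count, no max, no modulo.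
import Mathlib
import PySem

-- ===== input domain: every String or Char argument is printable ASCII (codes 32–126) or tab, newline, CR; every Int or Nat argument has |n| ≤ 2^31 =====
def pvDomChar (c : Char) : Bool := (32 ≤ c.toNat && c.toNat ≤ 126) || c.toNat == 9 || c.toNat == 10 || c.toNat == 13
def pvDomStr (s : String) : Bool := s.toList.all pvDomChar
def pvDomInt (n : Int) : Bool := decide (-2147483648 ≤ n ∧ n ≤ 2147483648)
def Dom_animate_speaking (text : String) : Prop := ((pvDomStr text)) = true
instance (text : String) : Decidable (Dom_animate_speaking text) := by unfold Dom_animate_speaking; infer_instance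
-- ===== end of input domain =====

-- B replaces A's count-driven index loop (frame_count, modulo branch) by a recursion
-- over the word list that emits one two-frame pair per word (objective: alternative).

-- ===== PORT A =====
def animate_speaking (text : String) : List String :=
  let word_count : Int := (PySem.Str.split₀ text).length
  let frame_count : Int := max 2 (word_count * 2)
  let frames : List String :=
    (PySem.List.pyRange 0 frame_count 1).foldl
      (fun frames i =>
        if PySem.Int.mod i 2 == 0 then frames ++ ["speaking_1"]
        else frames ++ ["speaking_2"]) []
  frames ++ ["idle"]

-- ===== PORT B =====
-- helper 'emit' of Source B: pair per word, at least one pair, then "idle"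
def pvEmit (ws : List String) : List String :=
  let rest := if ws.length ≤ 1 then ["idle"] else pvEmit (PySem.List.slice ws (some 1) none)
  ["speaking_1", "speaking_2"] ++ rest
termination_by ws.length
decreasing_by
  simp [PySem.List.slice_from_one]
  omega

def animate_speaking_alt (text : String) : List String :=
  pvEmit (PySem.Str.split₀ text)

-- ===== PRECONDITION & SPEC =====
def Spec_animate_speaking (text : String) (out : List String) : Prop := out = animate_speaking_alt text
instance (text : String) (out : List String) : Decidable (Spec_animate_speaking text out) := by unfold Spec_animate_speaking; infer_instance

-- ===== CLAIM (what is proved, stated in full; the proofs are below) =====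
def Claim_equal_animate_speaking : Prop := ∀ (text : String), Dom_animate_speaking text → Spec_animate_speaking text (animate_speaking text)

-- ===== LEMMAS AND PROOFS =====
lemma pv_loop_eq (k : Nat) :
    (PySem.List.pyRange 0 (2 * (k : Int)) 1).foldl
      (fun frames i =>
        if PySem.Int.mod i 2 == 0 then frames ++ ["speaking_1"]
        else frames ++ ["speaking_2"]) []
    = (List.replicate k ["speaking_1", "speaking_2"]).flatten := by
  induction k with
  | zero => decide
  | succ k ih =>
    have h1 : (0 : Int) ≤ 2 * (k : Int) := by positivity
    have h2 : (0 : Int) ≤ 2 * (k : Int) + 1 := by positivity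
    have e : (2 : Int) * ((k : Int) + 1) = (2 * (k : Int) + 1) + 1 := by ring
    push_cast
    rw [e, PySem.List.pyRange_one_succ_right h2, PySem.List.pyRange_one_succ_right h1,
      List.foldl_append, List.foldl_append, ih]
    simp [PySem.Int.mod, List.replicate_succ', List.flatten_append]

lemma pvEmit_eq (ws : List String) :
    pvEmit ws = (List.replicate (max 1 ws.length) ["speaking_1", "speaking_2"]).flatten ++ ["idle"] := by
  induction ws with
  | nil => rw [pvEmit]; simp
  | cons w t ih =>
    rw [pvEmit]
    cases t with
    | nil => simp
    | cons u v =>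
      simp only [PySem.List.slice_from_one, List.tail_cons, List.length_cons] at *
      rw [if_neg (by omega), ih]
      have : max 1 (v.length + 1 + 1) = (max 1 (v.length + 1)) + 1 := by omega
      rw [this]; simp [List.replicate_succ, List.flatten_cons]

-- ===== VERDICT (by name: the statement is the Claim_ definition above) =====
theorem animate_speaking_spec : Claim_equal_animate_speaking := by
  intro text _
  unfold Spec_animate_speaking animate_speaking animate_speaking_alt
  have h1 : max 2 (((PySem.Str.split₀ text).length : Int) * 2)
      = 2 * ((max 1 (PySem.Str.split₀ text).length : Nat) : Int) := by push_cast; omega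
  simp only [h1, pv_loop_eq, pvEmit_eq]
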